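-- pv_equiv track=rewrite | github.com/lorenzo2505-font/ITS-Esercizi | preparazione settembre-ottobre/recupero e potenziamento/es_matrice.py | caricoMax
-- ===== SOURCE A (Python) =====
-- def calcolaCarico(matrix: list[list[int]], index_r: int, index_c: int): # funzione per calcolare il calico
--
--     somma_riga = sum(matrix[index_r]) # variabile contenente il valore della somma degli elementi della riga specificata dall'indice passato in input
--     somma_colonna = 0 # somma degli elementi della colonna inizializzata a zero
--
--
--     for r in range(len(matrix)): # itero la matrice
--
--         for c in range(len(matrix[r])): # itero ogni riga della matrice
--
--             if c == index_c: # se l'indice c corrisponde a quello passato in input allora somma_colonna viene incrementato del valore matrix[r][c]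
--                 somma_colonna += matrix[r][c]
--
--     carico = somma_riga - somma_colonna # definisco la variabile carico uguale alla differenza tra la somma degli elementi di una riga e la somma degli elementi di una colonna
--
--     return carico # ritorno il valore di caricod
--
-- def caricoMax(matrix: list[list[int]]) -> tuple: # funzione per calcolare il carico con il valore più alto
--
--     max = False # variabile max inizializzata a False (0)
--
--     for r in range(len(matrix)): # itero la matrice
--
--         for c in range(len(matrix[r])): # itero la riga della matrice
--             t = calcolaCarico(matrix, r, c) # variabile t uguale al valore della funzione calcolaCarico() in cui sono passati in input la matrice, l'attuale indice r e l'attuale indice c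
--
--             if t > max or max is False: # se t è più grande del valore massimo o è false(0) allora il valore di max è uguale a quello di t e definisco una tupla contenente gli indici r e c
--                 max = t
--                 max_tuple: tuple = (r, c)
--
--     return max_tuple
-- ===== SOURCE B (Python) =====
-- def caricoMax(matrix: list[list[int]]) -> tuple:
--     # Precompute row sums and column sums once, then a single row-major pass
--     # keeping the first strict maximum of rowsum - colsum.
--     row_sums = [sum(row) for row in matrix]
--     ncols = max((len(row) for row in matrix), default=0)
--     col_sums = [sum(row[j] for row in matrix if len(row) > j) for j in range(ncols)]
--     best = None
--     best_rc = None
--     for r, row in enumerate(matrix):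
--         for c in range(len(row)):
--             t = row_sums[r] - col_sums[c]
--             if best is None or t > best:
--                 best = t
--                 best_rc = (r, c)
--     return best_rc
-- ===== Notes on version B (the rewrite author's own statement) =====
-- stated objective: faster
-- what changed: B precomputes all row sums and column sums once and then does a single row-major pass taking the first strict maximum of rowsum-colsum, instead of A's recomputation of the row sum and a full matrix scan for the column sum at every cell.
import Mathlib
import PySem

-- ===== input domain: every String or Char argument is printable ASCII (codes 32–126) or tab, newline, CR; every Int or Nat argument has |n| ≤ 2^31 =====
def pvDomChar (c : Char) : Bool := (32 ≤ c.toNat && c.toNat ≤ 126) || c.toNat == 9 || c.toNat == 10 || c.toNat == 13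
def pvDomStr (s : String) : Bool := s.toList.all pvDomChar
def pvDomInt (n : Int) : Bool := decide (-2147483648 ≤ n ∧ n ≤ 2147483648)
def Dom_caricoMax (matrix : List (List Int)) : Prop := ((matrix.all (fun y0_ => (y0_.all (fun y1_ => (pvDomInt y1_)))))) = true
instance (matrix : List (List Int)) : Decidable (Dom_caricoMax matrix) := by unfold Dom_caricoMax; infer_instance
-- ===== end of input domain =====

-- B precomputes all row and column sums once and selects the best cell in one
-- row-major pass, instead of A's per-cell recomputation of both sums (objective: faster).

-- ===== PORT A =====
-- calcolaCarico(matrix, index_r, index_c); matrix[index_r] / matrix[r] are in range at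
-- every occurrence, so the [] default of pyGetD is never taken.
def calcolaCarico (matrix : List (List Int)) (index_r index_c : Int) : Int :=
  let somma_riga := (PySem.List.pyGetD matrix index_r []).sum
  let somma_colonna :=
    (PySem.List.pyRange 0 (matrix.length : Int) 1).foldl (fun acc r =>
      (PySem.List.pyRange 0 ((PySem.List.pyGetD matrix r []).length : Int) 1).foldl (fun acc2 c =>
        if c == index_c then acc2 + PySem.List.pyGetD (PySem.List.pyGetD matrix r []) c 0 else acc2) acc) 0
  somma_riga - somma_colonna

-- 'max : False | int' is modelled as Option Int (none = False); max_tuple, unassigned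
-- until the first update, as Option (Int × Int).
def caricoMax (matrix : List (List Int)) : List Int :=
  let st :=
    (PySem.List.pyRange 0 (matrix.length : Int) 1).foldl (fun st r =>
      (PySem.List.pyRange 0 ((PySem.List.pyGetD matrix r []).length : Int) 1).foldl (fun st2 c =>
        let t := calcolaCarico matrix r c
        -- 't > max or max is False': with max = False, 't > False' is 't > 0'
        let cond : Bool := (match st2.1 with
          | none => decide (t > 0) || true
          | some m => decide (t > m) || false)
        if cond then (some t, some (r, c)) else st2) st)
      ((none, none) : Option Int × Option (Int × Int))
  match st.2 with
  | some rc => [rc.1, rc.2]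
  | none => []  -- Python raises NameError here (max_tuple unbound); excluded by Pre_

-- ===== PORT B =====
def caricoMax_alt (matrix : List (List Int)) : List Int :=
  let rowSums := matrix.map List.sum
  let ncols := PySem.List.maxD (matrix.map List.length) (fun x => x) 0
  let colSums := (List.range ncols).map (fun j =>
    ((matrix.filter (fun row => decide (j < row.length))).map (fun row => row.getD j 0)).sum)
  let st :=
    (PySem.List.enumerate matrix).foldl (fun st p =>
      (List.range p.2.length).foldl (fun st2 (c : Nat) =>
        let t := PySem.List.pyGetD rowSums p.1 0 - PySem.List.pyGetD colSums (c : Int) 0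
        match st2.1 with
        | none => (some t, some (p.1, (c : Int)))
        | some m => if t > m then (some t, some (p.1, (c : Int))) else st2) st)
      ((none, none) : Option Int × Option (Int × Int))
  match st.2 with
  | some rc => [rc.1, rc.2]
  | none => []  -- best_rc is still None: all rows empty; excluded by Pre_

-- ===== PRECONDITION & SPEC =====
-- Pre_ excludes matrices whose rows are all empty (including []): there Python A never
-- assigns max_tuple and raises NameError.
def Pre_caricoMax (matrix : List (List Int)) : Prop := ∃ row ∈ matrix, row ≠ []
instance (matrix : List (List Int)) : Decidable (Pre_caricoMax matrix) := by unfold Pre_caricoMax; infer_instance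
def pvWitness_caricoMax : List (List Int) := [[1, -2], [3]]
def Spec_caricoMax (matrix : List (List Int)) (out : List Int) : Prop := out = caricoMax_alt matrix
instance (matrix : List (List Int)) (out : List Int) : Decidable (Spec_caricoMax matrix out) := by unfold Spec_caricoMax; infer_instance

-- ===== CLAIM (what is proved, stated in full; the proofs are below) =====
def Claim_equal_caricoMax : Prop := ∀ (matrix : List (List Int)), Dom_caricoMax matrix → Pre_caricoMax matrix → Spec_caricoMax matrix (caricoMax matrix)

-- ===== LEMMAS AND PROOFS =====

-- the common selection step: first strict maximum of the t-value, in traversal order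
def pvStep (st : Option Int × Option (Int × Int)) (t : Int) (rc : Int × Int) :
    Option Int × Option (Int × Int) :=
  match st.1 with
  | none => (some t, some rc)
  | some m => if t > m then (some t, some rc) else st

-- the cells (k, c) in row-major order
def pvCells (matrix : List (List Int)) : List (Nat × Nat) :=
  (List.range matrix.length).flatMap (fun k => (List.range (matrix.getD k []).length).map (fun c => (k, c)))

-- B's column sum of column c (closed form)
def pvColSum (matrix : List (List Int)) (c : Nat) : Int :=
  ((matrix.filter (fun row => decide (c < row.length))).map (fun row => row.getD c 0)).sum

lemma pv_sum_filter_eq_sum_ite (matrix : List (List Int)) (c : Nat) :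
    pvColSum matrix c
      = (matrix.map (fun row => if c < row.length then row.getD c 0 else 0)).sum := by
  unfold pvColSum
  induction matrix with
  | nil => rfl
  | cons row rest ih =>
    rw [List.map_cons, List.sum_cons, List.filter_cons]
    by_cases h : c < row.length
    · rw [if_pos (by simpa using h), List.map_cons, List.sum_cons, ih, if_pos h]
    · rw [if_neg (by simpa using h), ih, if_neg h, zero_add]

lemma pv_filter_pyRange_eq (n ic : Int) :
    (PySem.List.pyRange 0 n 1).filter (fun c => c == ic)
      = if 0 ≤ ic ∧ ic < n then [ic] else [] := by
  split_ifs with h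
  · rw [PySem.List.pyRange_one_append 0 ic n h.1 (le_of_lt h.2),
        PySem.List.pyRange_one_cons h.2, List.filter_append, List.filter_cons]
    have h1 : (PySem.List.pyRange 0 ic 1).filter (fun c => c == ic) = [] := by
      refine List.filter_eq_nil_iff.mpr (fun a ha => ?_)
      rw [PySem.List.mem_pyRange_one] at ha
      simp only [beq_iff_eq]; omega
    have h2 : (PySem.List.pyRange (ic + 1) n 1).filter (fun c => c == ic) = [] := by
      refine List.filter_eq_nil_iff.mpr (fun a ha => ?_)
      rw [PySem.List.mem_pyRange_one] at ha
      simp only [beq_iff_eq]; omega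
    simp [h1, h2]
  · refine List.filter_eq_nil_iff.mpr (fun a ha => ?_)
    rw [PySem.List.mem_pyRange_one] at ha
    simp only [beq_iff_eq]
    intro hae; subst hae; exact h ⟨ha.1, ha.2⟩

-- A's inner column loop over one row adds row[ic] exactly when 0 ≤ ic < len(row)
lemma pv_inner_col (row : List Int) (ic acc : Int) :
    (PySem.List.pyRange 0 (row.length : Int) 1).foldl (fun acc2 c =>
        if c == ic then acc2 + PySem.List.pyGetD row c 0 else acc2) acc
      = acc + (if 0 ≤ ic ∧ ic < (row.length : Int) then PySem.List.pyGetD row ic 0 else 0) := by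
  rw [PySem.List.foldl_if_eq_foldl_filter (fun c => c == ic)
        (fun acc2 c => acc2 + PySem.List.pyGetD row c 0),
      pv_filter_pyRange_eq]
  split_ifs with h <;> simp

-- calcolaCarico at a valid cell equals rowsum − colsum
lemma pv_carico_eq (matrix : List (List Int)) (k c : Nat) (hk : k < matrix.length)
    (_hc : c < (matrix[k]).length) :
    calcolaCarico matrix (k : Int) (c : Int)
      = (matrix[k]).sum - pvColSum matrix c := by
  unfold calcolaCarico
  have hrow : PySem.List.pyGetD matrix (k : Int) [] = matrix[k] := by
    simp [List.getD_eq_getElem?_getD, hk]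
  rw [hrow]
  have hbody : ∀ (acc : Int) (row : List Int),
      (PySem.List.pyRange 0 (row.length : Int) 1).foldl (fun acc2 cc =>
          if cc == (c : Int) then acc2 + PySem.List.pyGetD row cc 0 else acc2) acc
        = acc + (if c < row.length then row.getD c 0 else 0) := by
    intro acc row
    rw [pv_inner_col row (c : Int) acc]
    congr 1
    split_ifs with h1 h2 h3
    · simp
    · exact absurd (by exact_mod_cast h1.2) h2
    · exact absurd (⟨Int.natCast_nonneg c, by exact_mod_cast h3⟩ :
        (0:Int) ≤ (c : Int) ∧ (c : Int) < (row.length : Int)) h1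
    · rfl
  have hcol : (PySem.List.pyRange 0 (matrix.length : Int) 1).foldl (fun acc r =>
          (PySem.List.pyRange 0 ((PySem.List.pyGetD matrix r []).length : Int) 1).foldl (fun acc2 cc =>
            if cc == (c : Int) then acc2 + PySem.List.pyGetD (PySem.List.pyGetD matrix r []) cc 0 else acc2) acc) 0
      = pvColSum matrix c := by
    calc (PySem.List.pyRange 0 (matrix.length : Int) 1).foldl (fun acc r =>
          (PySem.List.pyRange 0 ((PySem.List.pyGetD matrix r []).length : Int) 1).foldl (fun acc2 cc =>
            if cc == (c : Int) then acc2 + PySem.List.pyGetD (PySem.List.pyGetD matrix r []) cc 0 else acc2) acc) 0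
      = matrix.foldl (fun acc row =>
          (PySem.List.pyRange 0 (row.length : Int) 1).foldl (fun acc2 cc =>
            if cc == (c : Int) then acc2 + PySem.List.pyGetD row cc 0 else acc2) acc) 0 := by
          exact PySem.List.foldl_pyRange_zero_pyGetD' matrix []
            (fun acc row => (PySem.List.pyRange 0 (row.length : Int) 1).foldl (fun acc2 cc =>
              if cc == (c : Int) then acc2 + PySem.List.pyGetD row cc 0 else acc2) acc) 0
      _ = matrix.foldl (fun acc row => acc + (if c < row.length then row.getD c 0 else 0)) 0 := by
          exact PySem.List.foldl_congr_mem' matrix _ _ 0 (fun row _ acc => hbody acc row)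
      _ = pvColSum matrix c := by
          rw [PySem.List.foldl_add, pv_sum_filter_eq_sum_ite]; simp
  rw [hcol]

-- row.length ≤ ncols for every row of the matrix
lemma pv_len_le_ncols (matrix : List (List Int)) (row : List Int) (h : row ∈ matrix) :
    row.length ≤ PySem.List.maxD (matrix.map List.length) (fun x => x) 0 := by
  have hmem : row.length ∈ matrix.map List.length := List.mem_map_of_mem h
  have hne : matrix.map List.length ≠ [] := List.ne_nil_of_mem hmem
  cases hm : PySem.List.max? (matrix.map List.length) (fun x : Nat => x) with
  | none => exact absurd ((PySem.List.max?_eq_none_iff _ _).mp hm) hne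
  | some m =>
    have := PySem.List.max?_isMax hm _ hmem
    simpa [PySem.List.maxD, hm] using this

-- A's double loop is the selection fold with calcolaCarico over pvCells
lemma pv_A_fold (matrix : List (List Int)) :
    (PySem.List.pyRange 0 (matrix.length : Int) 1).foldl (fun st r =>
      (PySem.List.pyRange 0 ((PySem.List.pyGetD matrix r []).length : Int) 1).foldl (fun st2 c =>
        let t := calcolaCarico matrix r c
        let cond : Bool := (match st2.1 with
          | none => decide (t > 0) || true
          | some m => decide (t > m) || false)
        if cond then (some t, some (r, c)) else st2) st)
      ((none, none) : Option Int × Option (Int × Int))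
    = (pvCells matrix).foldl (fun st kc =>
        pvStep st (calcolaCarico matrix (kc.1 : Int) (kc.2 : Int)) ((kc.1 : Int), (kc.2 : Int)))
        ((none, none) : Option Int × Option (Int × Int)) := by
  unfold pvCells
  rw [List.foldl_flatMap, PySem.List.pyRange_zero_nat, List.foldl_map]
  refine PySem.List.foldl_congr_mem' _ _ _ _ (fun k _ st => ?_)
  rw [List.foldl_map]
  have hlen : PySem.List.pyGetD matrix ((k : Nat) : Int) [] = matrix.getD k [] :=
    PySem.List.pyGetD_natCast matrix k []
  rw [hlen, PySem.List.pyRange_zero_nat, List.foldl_map]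
  refine PySem.List.foldl_congr_mem' _ _ _ _ (fun c _ st2 => ?_)
  obtain ⟨b, tup⟩ := st2
  cases b <;> simp [pvStep]

-- B's double loop is the same selection fold over pvCells
lemma pv_B_fold (matrix : List (List Int)) :
    (PySem.List.enumerate matrix).foldl (fun st p =>
      (List.range p.2.length).foldl (fun st2 (c : Nat) =>
        let t := PySem.List.pyGetD (matrix.map List.sum) p.1 0
                  - PySem.List.pyGetD ((List.range (PySem.List.maxD (matrix.map List.length) (fun x => x) 0)).map
                      (fun j => ((matrix.filter (fun row => decide (j < row.length))).map (fun row => row.getD j 0)).sum))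
                      (c : Int) 0
        match st2.1 with
        | none => (some t, some (p.1, (c : Int)))
        | some m => if t > m then (some t, some (p.1, (c : Int))) else st2) st)
      ((none, none) : Option Int × Option (Int × Int))
    = (pvCells matrix).foldl (fun st kc =>
        pvStep st (calcolaCarico matrix (kc.1 : Int) (kc.2 : Int)) ((kc.1 : Int), (kc.2 : Int)))
        ((none, none) : Option Int × Option (Int × Int)) := by
  unfold pvCells
  rw [List.foldl_flatMap, PySem.List.enumerate_eq_map_pyRange matrix [], List.foldl_map,
      PySem.List.len_eq, PySem.List.pyRange_zero_nat, List.foldl_map]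
  refine PySem.List.foldl_congr_mem' _ _ _ _ (fun k hkmem st => ?_)
  have hk : k < matrix.length := List.mem_range.mp hkmem
  rw [List.foldl_map]
  have hlen : PySem.List.pyGetD matrix ((k : Nat) : Int) [] = matrix.getD k [] :=
    PySem.List.pyGetD_natCast matrix k []
  simp only [hlen]
  refine PySem.List.foldl_congr_mem' _ _ _ _ (fun c hcmem st2 => ?_)
  have hc' : c < (matrix.getD k []).length := List.mem_range.mp hcmem
  have hgd : matrix.getD k [] = matrix[k] := List.getD_eq_getElem matrix [] hk
  have ht : PySem.List.pyGetD (matrix.map List.sum) ((k : Nat) : Int) 0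
      - PySem.List.pyGetD ((List.range (PySem.List.maxD (matrix.map List.length) (fun x => x) 0)).map
          (fun j => ((matrix.filter (fun row => decide (j < row.length))).map (fun row => row.getD j 0)).sum))
          (c : Int) 0
      = calcolaCarico matrix ((k : Nat) : Int) ((c : Nat) : Int) := by
    have hcn : c < PySem.List.maxD (matrix.map List.length) (fun x => x) 0 :=
      lt_of_lt_of_le (hgd ▸ hc') (pv_len_le_ncols matrix _ (List.getElem_mem hk))
    rw [pv_carico_eq matrix k c hk (hgd ▸ hc')]
    congr 1
    · simp [List.getD_eq_getElem?_getD, hk]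
    · rw [PySem.List.pyGetD_natCast, PySem.List.getD_map_range _ _ _ _ hcn]
      rfl
  simp only [ht]
  obtain ⟨b, tup⟩ := st2
  cases b <;> simp [pvStep]

-- ===== VERDICT (by name: the statement is the Claim_ definition above) =====
theorem caricoMax_spec : Claim_equal_caricoMax := by
  intro matrix _ _
  unfold Spec_caricoMax caricoMax caricoMax_alt
  simp only [pv_A_fold, pv_B_fold]
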